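-- pv_equiv track=rewrite | github.com/boysbytes/cbk-markdown-to-html | .github/skills/cbk-markdown-to-html/scripts/cbk_markdown_to_html.py | _separate_consecutive_blockquotes
-- ===== SOURCE A (Python) =====
-- def _separate_consecutive_blockquotes(text: str) -> str:
--     """Insert a separator between adjacent blockquote blocks to prevent the parser
--     from merging them into a single <blockquote> element.
--
--     Two consecutive groups of '>' prefixed lines separated by blank lines
--     will be given an HTML comment separator so Python's markdown library
--     creates two distinct <blockquote> elements.
--     """
--     lines = text.split("\n")
--     result: list[str] = []
--     i = 0
--     while i < len(lines):
--         result.append(lines[i])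
--         # If this line is a blockquote line, look ahead
--         if lines[i].startswith(">"):
--             # Collect following blank lines
--             j = i + 1
--             blank_count = 0
--             while j < len(lines) and lines[j].strip() == "":
--                 j += 1
--                 blank_count += 1
--             # If blank lines found and next non-blank line is also a blockquote
--             if blank_count > 0 and j < len(lines) and lines[j].startswith(">"):
--                 # Emit the blank lines, then a separator, then continue
--                 for _ in range(blank_count):
--                     result.append("")
--                 result.append("<!-- blockquote-break -->")
--                 i = j
--                 continue
--         i += 1
--     return "\n".join(result)
-- ===== SOURCE B (Python) =====
-- def _separate_consecutive_blockquotes(text: str) -> str: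
--     """Insert a separator between adjacent blockquote blocks.
--
--     Single pass: blank lines seen right after a blockquote line are held in a
--     pending buffer; when the next significant line is another blockquote, the
--     buffer is emitted as empty lines plus a separator, otherwise it is emitted
--     unchanged.
--     """
--     result: list[str] = []
--     pending: list[str] = []  # blank lines held back after a blockquote line
--     after_bq = False
--     for line in text.split("\n"):
--         if line.startswith(">"):
--             if pending:
--                 result.extend("" for _ in pending)
--                 result.append("<!-- blockquote-break -->")
--                 pending = []
--             result.append(line)
--             after_bq = True
--         elif line.strip() == "":
--             if after_bq:
--                 pending.append(line)
--             else:
--                 result.append(line)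
--         else:
--             result.extend(pending)
--             pending = []
--             result.append(line)
--             after_bq = False
--     result.extend(pending)
--     return "\n".join(result)
-- ===== Notes on version B (the rewrite author's own statement) =====
-- stated objective: alternative
-- what changed: Replaces A's index-based while-loop with inner blank-line lookahead and jump (i = j) by a single left-to-right fold over the split lines whose state holds the result, a pending buffer of blank lines seen after a blockquote line, and an after-blockquote flag; the buffer is flushed as empty lines plus the separator when another blockquote line follows, or unchanged otherwise.
import Mathlib
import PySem

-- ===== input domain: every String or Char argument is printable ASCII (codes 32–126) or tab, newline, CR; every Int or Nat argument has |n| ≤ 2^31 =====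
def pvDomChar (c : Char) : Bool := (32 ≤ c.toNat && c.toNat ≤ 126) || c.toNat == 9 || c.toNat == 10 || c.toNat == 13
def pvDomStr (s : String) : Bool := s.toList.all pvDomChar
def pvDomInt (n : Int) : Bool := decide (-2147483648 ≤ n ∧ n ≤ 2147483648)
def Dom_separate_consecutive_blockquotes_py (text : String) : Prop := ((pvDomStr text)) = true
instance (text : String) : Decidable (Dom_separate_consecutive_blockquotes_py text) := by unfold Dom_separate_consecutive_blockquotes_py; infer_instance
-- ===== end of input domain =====

-- B replaces A's index/lookahead while-loop (with jump `i = j`) by a single left-to-right pass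
-- that holds blank lines after a blockquote line in a pending buffer; objective: alternative
-- one-pass state machine of the same cost.

-- ===== PORT A =====
def pvSep : List Char := "<!-- blockquote-break -->".toList

-- A's inner `while j < len(lines) and lines[j].strip() == ""` loop: number of leading blank lines
def pvCountBlanksA : List (List Char) → Nat
  | [] => 0
  | l :: rest => if PySem.Chars.strip l == [] then pvCountBlanksA rest + 1 else 0

-- A's outer while-loop: `lines` is the not-yet-processed suffix (i .. end), `acc` is `result`;
-- the separator branch jumps to the first non-blank line (`i = j`), the else-branch is `i += 1`
def pvLoopA : List (List Char) → List (List Char) → List (List Char)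
  | [], acc => acc
  | l :: rest, acc =>
    let acc' := acc ++ [l]
    if PySem.Chars.startswith l ['>'] then
      let bc := pvCountBlanksA rest
      let nextBq := match rest.drop bc with
        | [] => false
        | l' :: _ => PySem.Chars.startswith l' ['>']
      if 0 < bc && nextBq then
        pvLoopA (rest.drop bc) (acc' ++ List.replicate bc [] ++ [pvSep])
      else pvLoopA rest acc'
    else pvLoopA rest acc'
  termination_by lines _ => lines.length
  decreasing_by
    · simp [List.length_drop]
    · simp
    · simp

def separate_consecutive_blockquotes_py (text : String) : String :=
  String.ofList (PySem.Chars.join ['\n']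
    (pvLoopA (PySem.Chars.splitOn text.toList ['\n']) []))

-- ===== PORT B =====
-- one fold step of B: state = (result, pending blank lines, after-blockquote flag)
def pvStepB (st : List (List Char) × List (List Char) × Bool) (l : List Char) :
    List (List Char) × List (List Char) × Bool :=
  match st with
  | (res, pend, abq) =>
    if PySem.Chars.startswith l ['>'] then
      let res := if pend.isEmpty then res
                 else res ++ List.replicate pend.length [] ++ [pvSep]
      (res ++ [l], [], true)
    else if PySem.Chars.strip l == [] then
      if abq then (res, pend ++ [l], abq) else (res ++ [l], pend, abq)
    else (res ++ pend ++ [l], [], false)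

def separate_consecutive_blockquotes_py_alt (text : String) : String :=
  let st := (PySem.Chars.splitOn text.toList ['\n']).foldl pvStepB ([], [], false)
  String.ofList (PySem.Chars.join ['\n'] (st.1 ++ st.2.1))

-- ===== PRECONDITION & SPEC =====
def Spec_separate_consecutive_blockquotes_py (text : String) (out : String) : Prop := out = separate_consecutive_blockquotes_py_alt text
instance (text : String) (out : String) : Decidable (Spec_separate_consecutive_blockquotes_py text out) := by unfold Spec_separate_consecutive_blockquotes_py; infer_instance

-- ===== CLAIM (what is proved, stated in full; the proofs are below) =====
def Claim_equal_separate_consecutive_blockquotes_py : Prop := ∀ (text : String), Dom_separate_consecutive_blockquotes_py text → Spec_separate_consecutive_blockquotes_py text (separate_consecutive_blockquotes_py text)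

-- ===== LEMMAS AND PROOFS =====

theorem pvBlankNotBq {l : List Char} (h : PySem.Chars.strip l = []) :
    PySem.Chars.startswith l ['>'] = false := by
  by_contra hc
  rw [Bool.not_eq_false, PySem.Chars.startswith_iff] at hc
  obtain ⟨t, rfl⟩ := hc
  simp [PySem.Chars.strip, PySem.Chars.lstrip, PySem.Chars.rstrip, PySem.Chars.isspace] at h
  exact absurd (h '>' (by simp)) (by decide)

theorem pvStepB_res (res pend : List (List Char)) (abq : Bool) (l : List Char) :
    pvStepB (res, pend, abq) l =
      (res ++ (pvStepB ([], pend, abq) l).1, (pvStepB ([], pend, abq) l).2) := by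
  simp only [pvStepB]
  split_ifs <;> simp

theorem pvFoldB_res (lines : List (List Char)) (res pend : List (List Char)) (abq : Bool) :
    lines.foldl pvStepB (res, pend, abq) =
      (res ++ (lines.foldl pvStepB ([], pend, abq)).1,
       (lines.foldl pvStepB ([], pend, abq)).2) := by
  induction lines generalizing res pend abq with
  | nil => simp
  | cons l rest ih =>
    simp only [List.foldl_cons]
    rw [pvStepB_res]
    obtain ⟨d, p', b'⟩ := pvStepB ([], pend, abq) l
    rw [ih (res ++ d) p' b', ih d p' b']
    simp

theorem pvCountBlanksA_le (lines : List (List Char)) : pvCountBlanksA lines ≤ lines.length := by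
  induction lines with
  | nil => simp [pvCountBlanksA]
  | cons l rest ih => simp only [pvCountBlanksA]; split_ifs <;> simp; omega

theorem pvTake_blank (lines : List (List Char)) :
    ∀ l ∈ lines.take (pvCountBlanksA lines), PySem.Chars.strip l = [] := by
  induction lines with
  | nil => simp
  | cons l rest ih =>
    simp only [pvCountBlanksA]
    split_ifs with h
    · simp only [List.take_succ_cons, List.mem_cons]
      rintro x (rfl | hx)
      · simpa using h
      · exact ih x hx
    · simp

theorem pvDrop_head_nonblank (lines : List (List Char)) (l' : List Char)
    (t : List (List Char)) (h : lines.drop (pvCountBlanksA lines) = l' :: t) :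
    ¬ PySem.Chars.strip l' = [] := by
  induction lines generalizing l' t with
  | nil => simp at h
  | cons l rest ih =>
    simp only [pvCountBlanksA] at h
    split_ifs at h with hb
    · exact ih _ _ (by simpa using h)
    · simp at h
      intro hc
      exact hb (by simp [h.1 ▸ hc])

theorem pvFoldB_true_blanks (lines : List (List Char)) (pend : List (List Char)) :
    lines.foldl pvStepB ([], pend, true) =
      (lines.drop (pvCountBlanksA lines)).foldl pvStepB
        ([], pend ++ lines.take (pvCountBlanksA lines), true) := by
  induction lines generalizing pend with
  | nil => simp
  | cons l rest ih =>
    simp only [pvCountBlanksA]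
    split_ifs with hb
    · have hb' : PySem.Chars.strip l = [] := by simpa using hb
      have hnb := pvBlankNotBq hb'
      simp only [List.foldl_cons, List.drop_succ_cons, List.take_succ_cons]
      rw [show pvStepB ([], pend, true) l = ([], pend ++ [l], true) by
        simp [pvStepB, hnb, hb]]
      rw [ih (pend ++ [l])]
      simp
    · simp

theorem pvFoldB_false_nonbq (lines : List (List Char)) (res : List (List Char))
    (h : ∀ l ∈ lines, PySem.Chars.startswith l ['>'] = false) :
    lines.foldl pvStepB (res, [], false) = (res ++ lines, [], false) := by
  induction lines generalizing res with
  | nil => simp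
  | cons l rest ih =>
    simp only [List.foldl_cons]
    have hl := h l (by simp)
    have : pvStepB (res, [], false) l = (res ++ [l], [], false) := by
      simp only [pvStepB, hl]
      split_ifs <;> simp_all
    rw [this, ih (res ++ [l]) (fun x hx => h x (by simp [hx]))]
    simp

theorem pvMain : ∀ (n : Nat) (lines : List (List Char)), lines.length ≤ n →
    ∀ acc, pvLoopA lines acc =
      acc ++ (lines.foldl pvStepB ([], [], false)).1 ++ (lines.foldl pvStepB ([], [], false)).2.1 := by
  intro n
  induction n with
  | zero =>
    intro lines h acc
    have : lines = [] := List.eq_nil_of_length_eq_zero (Nat.le_zero.mp h)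
    subst this; simp [pvLoopA]
  | succ n ih =>
    intro lines hlen acc
    match lines with
    | [] => simp [pvLoopA]
    | l :: rest =>
      have hrn : rest.length ≤ n := by simpa using hlen
      rw [pvLoopA]
      by_cases hbq : PySem.Chars.startswith l ['>']
      · simp only [hbq, if_true]
        set bc := pvCountBlanksA rest with hbc
        have hfold1 : List.foldl pvStepB ([], [], false) (l :: rest)
            = List.foldl pvStepB ([l], [], true) rest := by
          simp only [List.foldl_cons]
          congr 1
          simp [pvStepB, hbq]
        cases hdrop : rest.drop bc with
        | nil =>
          have hle : rest.length ≤ bc := List.drop_eq_nil_iff.mp hdrop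
          have htk : rest.take bc = rest := List.take_of_length_le hle
          have hbl : ∀ x ∈ rest, PySem.Chars.strip x = [] := fun x hx =>
            pvTake_blank rest x (by rw [← hbc, htk]; exact hx)
          have hnbq : ∀ x ∈ rest, PySem.Chars.startswith x ['>'] = false :=
            fun x hx => pvBlankNotBq (hbl x hx)
          split_ifs with hc
          · simp at hc
          · rw [ih rest hrn, hfold1, pvFoldB_res rest [l] [] true,
              pvFoldB_true_blanks rest [], ← hbc, hdrop, htk,
              pvFoldB_false_nonbq rest [] hnbq]
            simp
        | cons l' rest'' =>
          have hnb' : ¬ PySem.Chars.strip l' = [] :=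
            pvDrop_head_nonblank rest l' rest'' (by rw [← hbc]; exact hdrop)
          have hlen' : bc ≤ rest.length := hbc ▸ pvCountBlanksA_le rest
          have htklen : (rest.take bc).length = bc := by simp [hlen']
          have hsplit : rest = rest.take bc ++ (l' :: rest'') := by
            rw [← hdrop]; exact (rest.take_append_drop bc).symm
          split_ifs with hc
          · -- separator branch
            have hpos : 0 < bc := by
              rcases Bool.and_eq_true_iff.mp hc with ⟨h1, _⟩
              simpa using h1
            have hbq' : PySem.Chars.startswith l' ['>'] = true :=
              (Bool.and_eq_true_iff.mp hc).2
            have hdlen : (l' :: rest'').length ≤ n := by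
              have h2 : (rest.drop bc).length ≤ rest.length := by simp [List.length_drop]
              rw [hdrop] at h2
              omega
            rw [ih (l' :: rest'') hdlen, hfold1, pvFoldB_res rest [l] [] true,
              pvFoldB_true_blanks rest [], ← hbc, hdrop]
            have hne : (rest.take bc).isEmpty = false := by
              rw [List.isEmpty_eq_false_iff]
              intro hnil; rw [hnil] at htklen; simp at htklen; omega
            simp only [List.foldl_cons, List.nil_append]
            rw [show pvStepB ([], rest.take bc, true) l'
                = (List.replicate bc [] ++ [pvSep] ++ [l'], [], true) by
              simp [pvStepB, hbq', hne, htklen]]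
            rw [show pvStepB ([], [], false) l' = ([l'], [], true) by simp [pvStepB, hbq']]
            rw [pvFoldB_res rest'' (List.replicate bc [] ++ [pvSep] ++ [l']) [] true,
                pvFoldB_res rest'' [l'] [] true]
            simp
          · -- no separator
            have hstate : List.foldl pvStepB ([], [], true) rest
                = List.foldl pvStepB ([], [], false) rest := by
              by_cases hbq' : PySem.Chars.startswith l' ['>'] = true
              · have hbc0 : bc = 0 := by
                  by_contra hne0
                  exact hc (by simp [hbq', Nat.pos_of_ne_zero hne0])
                have hrest : rest = l' :: rest'' := by
                  have := hdrop; rw [hbc0] at this; simpa using this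
                rw [hrest]
                simp only [List.foldl_cons]
                congr 1
                simp [pvStepB, hbq']
              · have hnbqtake : ∀ x ∈ rest.take bc, PySem.Chars.startswith x ['>'] = false :=
                  fun x hx => pvBlankNotBq (pvTake_blank rest x (hbc ▸ hx))
                rw [pvFoldB_true_blanks rest [], ← hbc, hdrop]
                conv_rhs => rw [hsplit]
                rw [List.foldl_append, pvFoldB_false_nonbq (rest.take bc) [] hnbqtake]
                simp only [List.foldl_cons, List.nil_append]
                rw [show pvStepB ([], rest.take bc, true) l'
                    = (rest.take bc ++ [l'], [], false) by simp [pvStepB, hbq', hnb'],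
                  show pvStepB (rest.take bc, [], false) l'
                    = (rest.take bc ++ [l'], [], false) by simp [pvStepB, hbq', hnb']]
            rw [ih rest hrn, hfold1, pvFoldB_res rest [l] [] true, hstate]
            simp
      · simp only [hbq]
        rw [ih rest hrn]
        have hfold : List.foldl pvStepB ([], [], false) (l :: rest)
            = List.foldl pvStepB ([l], [], false) rest := by
          simp only [List.foldl_cons]
          congr 1
          simp only [pvStepB, hbq]
          split_ifs <;> simp_all
        rw [hfold, pvFoldB_res rest [l] [] false]
        simp

-- ===== VERDICT (by name: the statement is the Claim_ definition above) =====
theorem separate_consecutive_blockquotes_py_spec : Claim_equal_separate_consecutive_blockquotes_py := by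
  intro text _
  unfold Spec_separate_consecutive_blockquotes_py separate_consecutive_blockquotes_py
    separate_consecutive_blockquotes_py_alt
  rw [pvMain (PySem.Chars.splitOn text.toList ['\n']).length _ le_rfl]
  simp
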